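-- pv_equiv track=rewrite | github.com/CSweetBlue/Spotify-Reorganized | SortMethods.py | sortPeakSupport
-- ===== SOURCE A (Python) =====
-- import copy
--
-- def sortPeakSupport(attrValues):
--         """
--         Function: Sorts into a Peak shape.
--         Returns: (List of) New order of values passed in.
--         """
--
--         count = 0
--         z = copy.deepcopy(attrValues)
--         z.sort()
--         attrValuesHalf1 = []
--         attrValuesHalf2 = []
--
--         for i in range(len(z)):
--                 if count % 2:
--                         attrValuesHalf1.append(z[-1])
--                 else:
--                         attrValuesHalf2.append(z[-1])
--
--                 z.remove(z[-1])
--                 count+=1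
--
--         attrValuesHalf2 = attrValuesHalf2[::-1]
--         z = attrValuesHalf2 + attrValuesHalf1
--
--         return z
-- ===== SOURCE B (Python) =====
-- from collections import deque
--
-- def sortPeakSupport(attrValues):
--     """Arrange the values into a peak (bitonic) shape."""
--     s = sorted(attrValues)
--     if not s:
--         return []
--     d = deque([s[-1]])
--     right = True
--     for x in reversed(s[:-1]):
--         if right:
--             d.append(x)
--         else:
--             d.appendleft(x)
--         right = not right
--     return list(d)
-- ===== Notes on version B (the rewrite author's own statement) =====
-- stated objective: simpler
-- what changed: Instead of repeatedly removing the list maximum into two halves and reversing/concatenating them, B sorts once and grows the peak outward from the center with a deque, alternately appending the next-largest element to the right and left ends.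
import Mathlib
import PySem

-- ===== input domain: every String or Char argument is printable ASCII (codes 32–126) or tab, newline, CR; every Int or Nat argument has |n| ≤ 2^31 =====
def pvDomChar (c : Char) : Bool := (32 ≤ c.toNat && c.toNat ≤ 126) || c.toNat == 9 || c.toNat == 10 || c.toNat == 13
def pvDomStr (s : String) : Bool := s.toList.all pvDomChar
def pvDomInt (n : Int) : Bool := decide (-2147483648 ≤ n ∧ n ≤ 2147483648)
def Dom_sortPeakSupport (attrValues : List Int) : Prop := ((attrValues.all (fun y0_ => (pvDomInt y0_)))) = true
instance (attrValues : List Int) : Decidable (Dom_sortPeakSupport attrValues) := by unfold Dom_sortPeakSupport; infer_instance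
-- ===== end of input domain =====

-- B builds the peak outward from the center with a deque instead of A's
-- remove-the-max-into-two-halves loop; objective: simpler (A mutates only its own deep copy).

-- ===== PORT A =====
-- one iteration of A's loop body (the loop index is unused by the body):
-- append z[-1] to the half chosen by count's parity, then z.remove(z[-1]), count += 1
def stepA : Nat × List Int × List Int × List Int → Nat × List Int × List Int × List Int
  | (count, z, h1, h2) =>
    match PySem.List.pyGet? z (-1) with
    | none => (count, z, h1, h2)          -- totality guard: z is never empty when read
    | some v =>
      match PySem.List.remove? z v with
      | none => (count, z, h1, h2)        -- totality guard: v is in z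
      | some z' =>
        if count % 2 ≠ 0 then (count + 1, z', h1 ++ [v], h2)
        else (count + 1, z', h1, h2 ++ [v])

-- after the loop: attrValuesHalf2[::-1] + attrValuesHalf1
def finishA (st : Nat × List Int × List Int × List Int) : List Int :=
  ((PySem.List.slice? st.2.2.2 none none (-1)).getD []) ++ st.2.2.1

def sortPeakSupport (attrValues : List Int) : List Int :=
  finishA ((PySem.List.pyRange 0 ((PySem.List.sorted attrValues (fun x => x) false).length : Int) 1).foldl
    (fun st _ => stepA st)
    (0, PySem.List.sorted attrValues (fun x => x) false, ([] : List Int), ([] : List Int)))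

-- ===== PORT B =====
-- deque as a plain list: append = ++ [x], appendleft = x :: ·; the Bool is the `right` flag
def stepB (st : List Int × Bool) (x : Int) : List Int × Bool :=
  if st.2 then (st.1 ++ [x], false) else (x :: st.1, true)

def sortPeakSupport_alt (attrValues : List Int) : List Int :=
  if (PySem.List.sorted attrValues (fun x => x) false).isEmpty then []
  else
    (((PySem.List.slice (PySem.List.sorted attrValues (fun x => x) false) none (some (-1))).reverse).foldl
      stepB
      ([(PySem.List.pyGet? (PySem.List.sorted attrValues (fun x => x) false) (-1)).getD 0], true)).1
      -- s is nonempty here, so s[-1] never takes the default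

-- ===== PRECONDITION & SPEC =====
def Spec_sortPeakSupport (attrValues : List Int) (out : List Int) : Prop := out = sortPeakSupport_alt attrValues
instance (attrValues : List Int) (out : List Int) : Decidable (Spec_sortPeakSupport attrValues out) := by unfold Spec_sortPeakSupport; infer_instance

-- ===== CLAIM (what is proved, stated in full; the proofs are below) =====
def Claim_equal_sortPeakSupport : Prop := ∀ (attrValues : List Int), Dom_sortPeakSupport attrValues → Spec_sortPeakSupport attrValues (sortPeakSupport attrValues)

-- ===== LEMMAS AND PROOFS =====

-- alternating split of a (descending) list: .1 = elements at even positions, .2 = odd positions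
def peakSplit : List Int → List Int × List Int
  | [] => ([], [])
  | a :: t => (a :: (peakSplit t).2, (peakSplit t).1)

def iterA : Nat → (Nat × List Int × List Int × List Int) → Nat × List Int × List Int × List Int
  | 0, st => st
  | n + 1, st => iterA n (stepA st)

theorem foldl_stepA_eq_iterA (l : List Int) (st : Nat × List Int × List Int × List Int) :
    l.foldl (fun st _ => stepA st) st = iterA l.length st := by
  induction l generalizing st with
  | nil => rfl
  | cons x t ih => simp [List.foldl, iterA, ih]

theorem remove_last_sorted (l : List Int) (v : Int)
    (h : (l ++ [v]).Pairwise (· ≤ ·)) :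
    PySem.List.remove? (l ++ [v]) v = some l := by
  induction l with
  | nil => simp [PySem.List.remove?_cons_self]
  | cons x t ih =>
    rw [List.cons_append] at h ⊢
    rcases List.pairwise_cons.mp h with ⟨hx, ht⟩
    by_cases hxv : x = v
    · subst hxv
      have hle : ∀ y ∈ t, y ≤ x := by
        intro y hy
        rcases List.pairwise_append.mp ht with ⟨_, _, hrel⟩
        exact hrel y hy x (by simp)
      have heq : ∀ y ∈ t, y = x := fun y hy =>
        le_antisymm (hle y hy) (hx y (by simp [hy]))
      have ht' : t = List.replicate t.length x := List.eq_replicate_of_mem heq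
      rw [PySem.List.remove?_cons_self]
      rw [ht', ← List.replicate_succ', List.replicate_succ]
    · rw [PySem.List.remove?_cons_of_ne _ hxv, ih ht]
      rfl

theorem iterA_spec (d : List Int) (hd : d.Pairwise (fun a b => b ≤ a)) :
    ∀ (count : Nat) (h1 h2 : List Int),
      iterA d.length (count, d.reverse, h1, h2) =
        (count + d.length, [],
         h1 ++ (if count % 2 = 0 then (peakSplit d).2 else (peakSplit d).1),
         h2 ++ (if count % 2 = 0 then (peakSplit d).1 else (peakSplit d).2)) := by
  induction d with
  | nil => intro count h1 h2; simp [iterA, peakSplit]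
  | cons a t ih =>
    intro count h1 h2
    rcases List.pairwise_cons.mp hd with ⟨ha, ht⟩
    have hsorted : (t.reverse ++ [a]).Pairwise (· ≤ ·) := by
      have h' : (a :: t).reverse.Pairwise (· ≤ ·) := by
        rw [List.pairwise_reverse]; exact hd
      simpa using h'
    have hget : PySem.List.pyGet? (t.reverse ++ [a]) (-1) = some a :=
      PySem.List.pyGet?_neg_one_append_singleton _ _
    have hrem : PySem.List.remove? (t.reverse ++ [a]) a = some t.reverse :=
      remove_last_sorted _ _ hsorted
    show iterA (t.length + 1) _ = _
    rw [iterA]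
    by_cases hc : count % 2 = 0
    · have hstep : stepA (count, (a :: t).reverse, h1, h2) = (count + 1, t.reverse, h1, h2 ++ [a]) := by
        simp [stepA, hget, hrem, hc]
      rw [hstep, ih ht (count + 1)]
      have hodd : ¬ (count + 1) % 2 = 0 := by omega
      simp only [hc, if_neg hodd, peakSplit, List.length_cons]
      refine Prod.ext (by omega) (Prod.ext rfl (Prod.ext rfl ?_))
      simp
    · have hstep : stepA (count, (a :: t).reverse, h1, h2) = (count + 1, t.reverse, h1 ++ [a], h2) := by
        simp [stepA, hget, hrem, hc]
      rw [hstep, ih ht (count + 1)]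
      have heven : (count + 1) % 2 = 0 := by omega
      simp only [if_neg hc, if_pos heven, peakSplit, List.length_cons]
      refine Prod.ext (by omega) (Prod.ext rfl (Prod.ext ?_ rfl))
      simp
    
theorem foldB_spec (t : List Int) :
    ∀ (l : List Int) (b : Bool),
      (t.foldl stepB (l, b)).1 =
        (if b then (peakSplit t).2 else (peakSplit t).1).reverse ++ l ++
        (if b then (peakSplit t).1 else (peakSplit t).2) := by
  induction t with
  | nil => intro l b; cases b <;> simp [peakSplit]
  | cons x t ih =>
    intro l b
    cases b
    · rw [List.foldl_cons]
      have hs : stepB (l, false) x = (x :: l, true) := by simp [stepB]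
      rw [hs, ih (x :: l) true]
      simp [peakSplit]
    · rw [List.foldl_cons]
      have hs : stepB (l, true) x = (l ++ [x], false) := by simp [stepB]
      rw [hs, ih (l ++ [x]) false]
      simp [peakSplit]

-- A's value in closed form over the descending sorted list
theorem sortPeakSupport_closed (attrValues : List Int) :
    sortPeakSupport attrValues =
      (peakSplit (PySem.List.sorted attrValues (fun x => x) false).reverse).1.reverse ++
      (peakSplit (PySem.List.sorted attrValues (fun x => x) false).reverse).2 := by
  unfold sortPeakSupport
  rw [foldl_stepA_eq_iterA]
  have hd : (PySem.List.sorted attrValues (fun x => x) false).reverse.Pairwise (fun a b => b ≤ a) := by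
    rw [List.pairwise_reverse]
    simpa using PySem.List.sorted_pairwise attrValues (fun x => x)
  have hlen : (PySem.List.pyRange 0 ((PySem.List.sorted attrValues (fun x => x) false).length : Int) 1).length
      = (PySem.List.sorted attrValues (fun x => x) false).reverse.length := by
    simp [PySem.List.length_pyRange_one]
  rw [hlen]
  have hrev : (0, PySem.List.sorted attrValues (fun x => x) false, ([] : List Int), ([] : List Int))
      = (0, (PySem.List.sorted attrValues (fun x => x) false).reverse.reverse, ([] : List Int), ([] : List Int)) := by
    rw [List.reverse_reverse]
  rw [hrev, iterA_spec _ hd 0 [] []]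
  simp [finishA, PySem.List.slice?_none_none_neg_one]

theorem sortPeakSupport_eq_alt (attrValues : List Int) :
    sortPeakSupport attrValues = sortPeakSupport_alt attrValues := by
  rw [sortPeakSupport_closed]
  unfold sortPeakSupport_alt
  by_cases hzn : PySem.List.sorted attrValues (fun x => x) false = []
  · simp [hzn, peakSplit]
  · have hne : (PySem.List.sorted attrValues (fun x => x) false).isEmpty = false := by simp [hzn]
    rw [hne]
    simp only [Bool.false_eq_true, if_false]
    obtain ⟨a, t, hat⟩ : ∃ a t, (PySem.List.sorted attrValues (fun x => x) false).reverse = a :: t := by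
      cases h : (PySem.List.sorted attrValues (fun x => x) false).reverse with
      | nil => exact absurd (by simpa using congrArg List.reverse h) hzn
      | cons a t => exact ⟨a, t, rfl⟩
    have hzat : PySem.List.sorted attrValues (fun x => x) false = t.reverse ++ [a] := by
      have h' := congrArg List.reverse hat
      simpa using h'
    have hget : PySem.List.pyGet? (PySem.List.sorted attrValues (fun x => x) false) (-1) = some a := by
      rw [hzat]; exact PySem.List.pyGet?_neg_one_append_singleton _ _
    have hslice : PySem.List.slice (PySem.List.sorted attrValues (fun x => x) false) none (some (-1)) = t.reverse := by
      rw [PySem.List.slice_to_neg_one, hzat, List.dropLast_concat]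
    rw [hget, hslice, List.reverse_reverse, hat]
    simp only [Option.getD_some]
    rw [foldB_spec t [a] true]
    simp [peakSplit]

-- ===== VERDICT (by name: the statement is the Claim_ definition above) =====
theorem sortPeakSupport_spec : Claim_equal_sortPeakSupport := by
  intro attrValues _
  exact sortPeakSupport_eq_alt attrValues
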